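-- pv_equiv track=rewrite | github.com/Pranay-KC10/Smart-Safety-Kitchen-AI | run_webcam.py | check_safety_alerts
-- ===== SOURCE A (Python) =====
-- def check_safety_alerts(detections):
--     """Check for potential safety hazards"""
--     alerts = []
--
--     has_flame = any(d["class"] == "Flame" for d in detections)
--     has_person = any(d["class"] == "Person" for d in detections)
--     has_stove = any(d["class"] == "Stove" for d in detections)
--     has_knife = any(d["class"] == "knife" for d in detections)
--
--     # Alert: Flame detected without person
--     if has_flame and not has_person:
--         alerts.append("WARNING: Unattended flame detected!")
--
--     # Alert: Stove on without person (if flame visible on stove)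
--     if has_flame and has_stove and not has_person:
--         alerts.append("DANGER: Stove left unattended!")
--
--     return alerts
-- ===== SOURCE B (Python) =====
-- RULES = [
--     (["Flame"], ["Person"], "WARNING: Unattended flame detected!"),
--     (["Flame", "Stove"], ["Person"], "DANGER: Stove left unattended!"),
-- ]
--
--
-- def check_safety_alerts(detections):
--     """Check for potential safety hazards"""
--     counts = {}
--     for d in detections:
--         counts[d["class"]] = counts.get(d["class"], 0) + 1
--     return [msg for required, forbidden, msg in RULES
--             if all(c in counts for c in required)
--             and not any(c in counts for c in forbidden)]
-- ===== Notes on version B (the rewrite author's own statement) =====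
-- stated objective: alternative
-- what changed: Replaces A's four hardcoded any-scans and two if-branches by a data-driven design: one loop builds a counter of class names, then the alerts are produced by filtering a declarative rule table (required classes, forbidden classes, message) against counter membership.
import Mathlib
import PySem

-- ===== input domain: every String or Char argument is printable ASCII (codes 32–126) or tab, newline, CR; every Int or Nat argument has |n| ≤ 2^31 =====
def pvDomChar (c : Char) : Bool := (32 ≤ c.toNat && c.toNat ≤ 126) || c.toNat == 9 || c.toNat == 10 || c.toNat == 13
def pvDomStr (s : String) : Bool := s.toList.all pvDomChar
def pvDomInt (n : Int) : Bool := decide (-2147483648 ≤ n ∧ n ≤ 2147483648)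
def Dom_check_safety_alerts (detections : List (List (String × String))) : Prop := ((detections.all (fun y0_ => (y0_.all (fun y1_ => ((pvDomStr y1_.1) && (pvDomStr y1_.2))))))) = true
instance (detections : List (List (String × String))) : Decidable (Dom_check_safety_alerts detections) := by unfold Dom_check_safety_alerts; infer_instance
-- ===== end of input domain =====

-- B is data-driven: one loop builds a counter of class names, then a declarative rule
-- table (required, forbidden, message) is filtered against counter membership.

-- d["class"] under Pre_ (key present); total form via default, exact inside Pre_
def pvClass (d : List (String × String)) : String := PySem.Dict.getD ⟨d⟩ "class" ""

-- ===== PORT A =====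
def check_safety_alerts (detections : List (List (String × String))) : List String :=
  let alerts : List String := []
  let has_flame := detections.any (fun d => pvClass d == "Flame")
  let has_person := detections.any (fun d => pvClass d == "Person")
  let has_stove := detections.any (fun d => pvClass d == "Stove")
  let _has_knife := detections.any (fun d => pvClass d == "knife")
  let alerts := if has_flame && !has_person then alerts ++ ["WARNING: Unattended flame detected!"] else alerts
  let alerts := if has_flame && has_stove && !has_person then alerts ++ ["DANGER: Stove left unattended!"] else alerts
  alerts

-- ===== PORT B =====
def pvRULES : List (List String × List String × String) :=
  [ (["Flame"], ["Person"], "WARNING: Unattended flame detected!"),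
    (["Flame", "Stove"], ["Person"], "DANGER: Stove left unattended!") ]

def check_safety_alerts_alt (detections : List (List (String × String))) : List String :=
  let counts : PySem.Dict String Int :=
    detections.foldl (fun cnt d => cnt.insert (pvClass d) (cnt.getD (pvClass d) 0 + 1)) PySem.Dict.empty
  (pvRULES.filter (fun r =>
      r.1.all (fun c => counts.contains c) && !(r.2.1.any (fun c => counts.contains c)))).map
    (fun r => r.2.2)

-- ===== PRECONDITION & SPEC =====
-- Pre_ excludes dicts missing the "class" key (Python raises KeyError there; A can still
-- return when all four scans short-circuit before the malformed dict, B always raises).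
def Pre_check_safety_alerts (detections : List (List (String × String))) : Prop :=
  (detections.all (fun d => d.any (fun kv => kv.1 == "class"))) = true
instance (detections : List (List (String × String))) : Decidable (Pre_check_safety_alerts detections) := by unfold Pre_check_safety_alerts; infer_instance
def pvWitness_check_safety_alerts : (List (List (String × String))) := [[("class", "Flame")], [("class", "Stove")]]
def Spec_check_safety_alerts (detections : List (List (String × String))) (out : List String) : Prop := out = check_safety_alerts_alt detections
instance (detections : List (List (String × String))) (out : List String) : Decidable (Spec_check_safety_alerts detections out) := by unfold Spec_check_safety_alerts; infer_instance

-- ===== CLAIM (what is proved, stated in full; the proofs are below) =====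
def Claim_equal_check_safety_alerts : Prop := ∀ (detections : List (List (String × String))), Dom_check_safety_alerts detections → Pre_check_safety_alerts detections → Spec_check_safety_alerts detections (check_safety_alerts detections)

-- ===== LEMMAS AND PROOFS =====

-- membership in the counter built by B's loop = one of A's any-scans
lemma contains_count_loop (l : List (List (String × String))) (d : PySem.Dict String Int) (c : String) :
    PySem.Dict.contains (l.foldl (fun cnt x => cnt.insert (pvClass x) (cnt.getD (pvClass x) 0 + 1)) d) c
      = (d.contains c || l.any (fun x => pvClass x == c)) := by
  induction l generalizing d with
  | nil => simp
  | cons h t ih =>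
      simp only [List.foldl_cons, ih, PySem.Dict.contains_insert, List.any_cons]
      rw [show (c == pvClass h) = (pvClass h == c) by simp [eq_comm]]
      cases pvClass h == c <;> cases d.contains c <;> simp

-- ===== VERDICT (by name: the statement is the Claim_ definition above) =====
theorem check_safety_alerts_spec : Claim_equal_check_safety_alerts := by
  intro detections _ _
  show check_safety_alerts detections = check_safety_alerts_alt detections
  unfold check_safety_alerts check_safety_alerts_alt pvRULES
  simp only [List.filter, List.all, List.any, contains_count_loop,
    PySem.Dict.contains_empty, Bool.false_or]
  set f := detections.any (fun d => pvClass d == "Flame")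
  set p := detections.any (fun d => pvClass d == "Person")
  set st := detections.any (fun d => pvClass d == "Stove")
  cases f <;> cases p <;> cases st <;> simp
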